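-- pv_equiv track=rewrite | github.com/pypi-data/pypi-mirror-224 | packages/writersimple/writersimple-1.5.0.tar.gz/writersimple-1.5.0/writersimple/__init__.py | write_revers
-- ===== SOURCE A (Python) =====
-- def write_revers(text, time, addition):
--     ready = ""
--     ready2 = ""
--     for i in range(time):
--         for i in range(addition):
--             ready = ready + text[::-1]
--             ready = ready + " "
--         ready2 = ready2 + ready + "\n"
--         ready = ""
--     return ready2
-- ===== SOURCE B (Python) =====
-- def write_revers(text, time, addition):
--     if time <= 0:
--         return ""
--     return ((text[::-1] + " ") * addition + "\n") * time
-- ===== Notes on version B (the rewrite author's own statement) =====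
-- stated objective: simpler
-- what changed: Replaces the two nested accumulation loops with a closed-form string multiplication: one line is (reversed text + space) * addition, the result is (line + newline) * time (empty for time <= 0).
import Mathlib
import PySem

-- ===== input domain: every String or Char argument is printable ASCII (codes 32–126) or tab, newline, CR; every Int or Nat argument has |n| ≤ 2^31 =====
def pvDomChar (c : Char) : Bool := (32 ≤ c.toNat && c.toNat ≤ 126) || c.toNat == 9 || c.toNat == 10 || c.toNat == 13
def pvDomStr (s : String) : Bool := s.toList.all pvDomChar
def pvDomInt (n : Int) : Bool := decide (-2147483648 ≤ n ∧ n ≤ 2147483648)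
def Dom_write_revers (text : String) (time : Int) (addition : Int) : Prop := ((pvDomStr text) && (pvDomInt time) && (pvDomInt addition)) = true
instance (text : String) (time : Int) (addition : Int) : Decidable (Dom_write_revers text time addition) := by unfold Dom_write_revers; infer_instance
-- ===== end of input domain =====

-- B replaces A's two nested accumulation loops with a closed-form repetition
-- ((text[::-1] + " ") * addition + "\n") * time; same result, simpler (objective: simpler).

-- ===== PORT A =====
-- Literal transliteration of A: nested loops over range(time) / range(addition),
-- state (ready, ready2) carried as lists of chars (PySem.Chars side of String).
def write_revers (text : String) (time : Int) (addition : Int) : String :=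
  let final :=
    (PySem.List.pyRange 0 time 1).foldl
      (fun (st : List Char × List Char) (_ : Int) =>
        let ready :=
          (PySem.List.pyRange 0 addition 1).foldl
            (fun (r : List Char) (_ : Int) =>
              let r := r ++ ((PySem.List.slice? text.toList none none (-1)).getD [])
              r ++ [' '])
            st.1
        let ready2 := st.2 ++ ready ++ ['\n']
        ([], ready2))
      ([], [])
  String.ofList final.2

-- ===== PORT B =====
-- Literal transliteration of B: ((text[::-1] + " ") * addition + "\n") * time.
def write_revers_alt (text : String) (time : Int) (addition : Int) : String :=
  if time ≤ 0 then "" else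
  String.ofList
    (PySem.List.pyRepeat
      (PySem.List.pyRepeat
        (((PySem.List.slice? text.toList none none (-1)).getD []) ++ [' ']) addition
        ++ ['\n']) time)

-- ===== PRECONDITION & SPEC =====
def Spec_write_revers (text : String) (time : Int) (addition : Int) (out : String) : Prop := out = write_revers_alt text time addition
instance (text : String) (time : Int) (addition : Int) (out : String) : Decidable (Spec_write_revers text time addition out) := by unfold Spec_write_revers; infer_instance

-- ===== CLAIM (what is proved, stated in full; the proofs are below) =====
def Claim_equal_write_revers : Prop := ∀ (text : String) (time : Int) (addition : Int), Dom_write_revers text time addition → Spec_write_revers text time addition (write_revers text time addition)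

-- ===== LEMMAS AND PROOFS =====

-- the inner loop, started at r, appends n copies of (rev ++ [' '])
theorem pv_inner (rev : List Char) (n : Nat) (r : List Char) :
    (List.range n).foldl (fun (r : List Char) (_ : Nat) => (r ++ rev) ++ [' ']) r
      = r ++ (List.replicate n (rev ++ [' '])).flatten := by
  induction n generalizing r with
  | zero => simp
  | succ n ih =>
      rw [List.range_succ, List.foldl_append]
      rw [ih]; simp [List.replicate_succ' (n := n)]

-- the outer loop appends `time` copies of line to the accumulator and keeps ready = []
theorem pv_outer (line : List Char) (n : Nat) (acc : List Char) :
    (List.range n).foldl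
      (fun (st : List Char × List Char) (_ : Nat) => (([] : List Char), st.2 ++ (st.1 ++ line)))
      ([], acc)
      = ([], acc ++ (List.replicate n line).flatten) := by
  induction n generalizing acc with
  | zero => simp
  | succ n ih =>
      rw [List.range_succ, List.foldl_append]
      rw [ih]; simp [List.replicate_succ' (n := n)]

-- ===== VERDICT (by name: the statement is the Claim_ definition above) =====
theorem write_revers_spec : Claim_equal_write_revers := by
  intro text time addition _
  show write_revers text time addition = write_revers_alt text time addition
  unfold write_revers write_revers_alt
  by_cases ht : time ≤ 0
  · have h0 : (time - 0).toNat = 0 := by omega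
    simp [ht, PySem.List.pyRange_one, h0]
  rw [PySem.List.slice?_none_none_neg_one]
  rw [if_neg ht]
  simp only [Option.getD_some, PySem.List.pyRange_one, List.foldl_map,
    PySem.List.pyRepeat, Int.sub_zero]
  have hbody :
      (fun (st : List Char × List Char) (_ : Nat) =>
        (([] : List Char),
          st.2 ++ ((List.range addition.toNat).foldl
            (fun (r : List Char) (_ : Nat) => (r ++ text.toList.reverse) ++ [' ']) st.1) ++ ['\n']))
      = (fun (st : List Char × List Char) (_ : Nat) =>
        (([] : List Char),
          st.2 ++ (st.1 ++ ((List.replicate addition.toNat (text.toList.reverse ++ [' '])).flatten ++ ['\n'])))) := by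
    funext st x
    rw [pv_inner]; simp
  rw [hbody,
    pv_outer ((List.replicate addition.toNat (text.toList.reverse ++ [' '])).flatten ++ ['\n'])
      time.toNat ([] : List Char)]
  simp
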